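-- pv_equiv track=rewrite | github.com/WilliamGu98/AdventOfCode2017 | Day7/day7_solution.py | reallocate
-- ===== SOURCE A (Python) =====
-- def reallocate(banks):
--     states = [(banks[:])] #holds history of bank states
--     counter = 0
--     while True:
--         redistribute(banks)
--         counter+=1
--         for state in states: #Check current state against all past states
--             if state==banks:
--                 return counter
--         states.append(banks[:])
--
-- def redistribute(banks):
--     max_val = max(banks)
--     i_max = banks.index(max_val)
--     banks[i_max] = 0
--     while max_val > 0:
--         i_max+=1
--         banks[(i_max)%len(banks)]+=1
--         max_val-=1
--     return banks
-- ===== SOURCE B (Python) =====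
-- def reallocate(banks):
--     # Same return value as the original; redistribute is done in O(n) closed form
--     # (divmod) instead of one block at a time, and history is a set, not a list scan.
--     n = len(banks)
--     seen = {tuple(banks)}
--     counter = 0
--     while True:
--         m = max(banks)
--         i = banks.index(m)
--         if m > 0:
--             q, r = divmod(m, n)
--             banks[:] = [x + q for x in banks]
--             banks[i] = q
--             for k in range(1, r + 1):
--                 banks[(i + k) % n] += 1
--         else:
--             banks[i] = 0
--         counter += 1
--         t = tuple(banks)
--         if t in seen:
--             return counter
--         seen.add(t)
-- ===== Notes on version B (the rewrite author's own statement) =====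
-- stated objective: faster
-- what changed: redistribute is re-implemented in closed form with divmod (add q=max//n to every bank, set the source bank to q, give one extra to the r=max%n following positions) instead of handing out one block per while-loop iteration, and the history of past states is kept in a set instead of being re-scanned linearly each round.
import Mathlib
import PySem

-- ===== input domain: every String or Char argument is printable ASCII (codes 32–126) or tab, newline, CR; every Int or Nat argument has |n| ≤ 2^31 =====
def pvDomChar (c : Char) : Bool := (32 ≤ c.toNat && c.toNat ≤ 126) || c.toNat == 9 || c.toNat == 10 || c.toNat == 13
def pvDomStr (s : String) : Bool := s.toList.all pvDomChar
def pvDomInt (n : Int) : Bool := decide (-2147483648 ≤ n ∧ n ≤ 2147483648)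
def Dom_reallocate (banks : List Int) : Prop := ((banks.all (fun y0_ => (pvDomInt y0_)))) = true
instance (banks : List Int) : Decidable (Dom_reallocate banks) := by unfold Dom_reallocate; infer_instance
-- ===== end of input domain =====

-- B replaces the one-block-at-a-time redistribution with an O(n) divmod closed form and
-- the linear history scan with a set; return value (and the in-place mutation of banks,
-- which both versions perform identically) is unchanged.

-- Both loops run until a previously seen state repeats; the fuel below is a totality
-- guard only (both ports use the same bound and both return 0 on exhaustion).
def pvFuel (banks : List Int) : Nat :=
  ((banks.length + 3) * ((banks.map (fun x => x.natAbs)).sum + 1)) ^ banks.length + 2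

-- ===== PORT A =====
-- while max_val > 0: i_max += 1; banks[i_max % len(banks)] += 1; max_val -= 1
def pvRedistLoopA (banks : List Int) (i : Int) (m : Int) : List Int :=
  if h : m > 0 then
    pvRedistLoopA
      (PySem.List.pySetD banks (PySem.Int.mod (i + 1) (PySem.List.len banks))
        (PySem.List.pyGetD banks (PySem.Int.mod (i + 1) (PySem.List.len banks)) 0 + 1))
      (i + 1) (m - 1)
  else banks
termination_by m.toNat
decreasing_by omega

-- def redistribute(banks): max_val = max(banks); i_max = banks.index(max_val); banks[i_max] = 0; while ...
def pvRedistA (banks : List Int) : List Int :=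
  match PySem.List.max? banks (fun x => x) with
  | none => banks            -- Python raises ValueError here (empty banks); Pre_ excludes []
  | some m =>
    match PySem.List.index? banks m with
    | none => banks          -- unreachable: max is a member
    | some i0 => pvRedistLoopA (PySem.List.pySetD banks (i0 : Int) 0) (i0 : Int) m

def pvLoopA (fuel : Nat) (banks : List Int) (states : List (List Int)) (counter : Int) : Int :=
  match fuel with
  | 0 => 0
  | Nat.succ f =>
    let b := pvRedistA banks
    let c := counter + 1
    -- for state in states: if state == banks: return counter
    if b ∈ states then c else pvLoopA f b (states ++ [b]) c

def reallocate (banks : List Int) : Int :=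
  pvLoopA (pvFuel banks) banks [banks] 0

-- ===== PORT B =====
def pvRedistB (banks : List Int) : List Int :=
  match PySem.List.max? banks (fun x => x) with
  | none => banks            -- Python raises ValueError here (empty banks); Pre_ excludes []
  | some m =>
    match PySem.List.index? banks m with
    | none => banks          -- unreachable: max is a member
    | some i0 =>
      let n : Int := PySem.List.len banks
      if m > 0 then
        match PySem.Int.divmod? m n with
        | none => banks      -- unreachable: n > 0 here
        | some (q, r) =>
          let b1 := banks.map (fun x => x + q)
          let b2 := PySem.List.pySetD b1 (i0 : Int) q
          (PySem.List.pyRange 1 (r + 1) 1).foldl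
            (fun acc k =>
              PySem.List.pySetD acc (PySem.Int.mod ((i0 : Int) + k) n)
                (PySem.List.pyGetD acc (PySem.Int.mod ((i0 : Int) + k) n) 0 + 1)) b2
      else PySem.List.pySetD banks (i0 : Int) 0

def pvLoopB (fuel : Nat) (banks : List Int) (seen : PySem.Set (List Int)) (counter : Int) : Int :=
  match fuel with
  | 0 => 0
  | Nat.succ f =>
    let b := pvRedistB banks
    let c := counter + 1
    if b ∈ seen then c else pvLoopB f b (PySem.Set.add seen b) c

def reallocate_alt (banks : List Int) : Int :=
  pvLoopB (pvFuel banks) banks (PySem.Set.ofList [banks]) 0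

-- ===== PRECONDITION & SPEC =====
-- Pre_ excludes only the empty list, on which A raises ValueError (max of an empty sequence).
def Pre_reallocate (banks : List Int) : Prop := banks ≠ []
instance (banks : List Int) : Decidable (Pre_reallocate banks) := by unfold Pre_reallocate; infer_instance
def pvWitness_reallocate : List Int := [0, 2, 7, 0]

def Spec_reallocate (banks : List Int) (out : Int) : Prop := out = reallocate_alt banks
instance (banks : List Int) (out : Int) : Decidable (Spec_reallocate banks out) := by unfold Spec_reallocate; infer_instance

-- ===== CLAIM (what is proved, stated in full; the proofs are below) =====
def Claim_equal_reallocate : Prop := ∀ (banks : List Int), Dom_reallocate banks → Pre_reallocate banks → Spec_reallocate banks (reallocate banks)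

-- ===== LEMMAS AND PROOFS =====


-- number of increments index j receives in A's while loop started at cursor i with m blocks left
def pvCnt (n : Nat) (i m : Int) (j : Nat) : Int :=
  if h : 0 < m then (if (i + 1) % (n : Int) = (j : Int) then 1 else 0) + pvCnt n (i + 1) (m - 1) j
  else 0
termination_by m.toNat
decreasing_by omega

theorem pvDivmod (m n : Int) (h : 0 < n) : PySem.Int.divmod? m n = some (m / n, m % n) := by
  simp [PySem.Int.divmod?, h.ne']
  exact ⟨by simp [Int.fdiv_eq_ediv, h.le], by simp [Int.fmod_eq_emod, h.le]⟩

theorem pvRedistLoopA_len (b : List Int) (i m : Int) :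
    (pvRedistLoopA b i m).length = b.length := by
  induction b, i, m using pvRedistLoopA.induct with
  | case1 b i m h ih => rw [pvRedistLoopA, dif_pos h, ih, PySem.List.length_pySetD]
  | case2 b i m h => rw [pvRedistLoopA, dif_neg h]

theorem pvRedistLoopA_get (k : Nat) (b : List Int) (i : Int) (j : Nat) (hj : j < b.length) :
    (pvRedistLoopA b i (k : Int))[j]? = some (b[j]'hj + pvCnt b.length i (k : Int) j) := by
  induction k generalizing b i with
  | zero =>
    rw [pvRedistLoopA, dif_neg (by omega), pvCnt, dif_neg (by omega)]
    simp [List.getElem?_eq_getElem hj]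
  | succ k ih =>
    have hn : 0 < b.length := Nat.lt_of_le_of_lt (Nat.zero_le j) hj
    have hpos : (0 : Int) < ((k : Int) + 1) := by omega
    have hm : PySem.Int.mod (i + 1) (PySem.List.len b) = (i + 1) % (b.length : Int) := by
      rw [PySem.List.len_eq, PySem.Int.mod_eq_emod_of_pos (by exact_mod_cast hn)]
    have hk0 : (0 : Int) ≤ (i + 1) % (b.length : Int) := Int.emod_nonneg _ (by exact_mod_cast hn.ne')
    have hklt : (i + 1) % (b.length : Int) < (b.length : Int) := Int.emod_lt_of_pos _ (by exact_mod_cast hn)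
    have hkNat : ((i + 1) % (b.length : Int)).toNat < b.length := by omega
    rw [show ((k + 1 : Nat) : Int) = (k : Int) + 1 by push_cast; ring]
    rw [pvRedistLoopA, dif_pos hpos]
    have hstep : ((k : Int) + 1 - 1) = (k : Int) := by ring
    rw [hstep, hm]
    rw [PySem.List.pyGetD_eq_getElem b 0 hk0 (by simpa using hklt),
      PySem.List.pySetD_of_nonneg b _ hk0]
    rw [ih (b.set _ _) (i + 1) (by simpa using hj)]
    rw [show pvCnt b.length i ((k : Int) + 1) j
        = ((if (i + 1) % (b.length : Int) = (j : Int) then 1 else 0)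
            + pvCnt b.length (i + 1) ((k : Int)) j) from by
      rw [pvCnt, dif_pos hpos, hstep]]
    simp only [List.length_set, List.getElem_set]
    congr 1
    split_ifs with h1 h2 h3
    · subst h1; ring
    · exfalso; apply h2; omega
    · exfalso; apply h1; omega
    · ring

-- closed form for pvCnt: total increments = floor((m - d + n)/n) with d = ((j - i - 1) mod n) + 1
theorem pvCnt_closed (n : Nat) (hn : 0 < n) (k : Nat) (i : Int) (j : Nat) (hj : j < n) :
    pvCnt n i (k : Int) j = ((k : Int) - (((j : Int) - i - 1) % (n : Int) + 1) + n) / n := by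
  induction k generalizing i with
  | zero =>
    have hD0 : (0 : Int) ≤ ((j : Int) - i - 1) % (n : Int) := Int.emod_nonneg _ (by exact_mod_cast hn.ne')
    have hDn : ((j : Int) - i - 1) % (n : Int) < (n : Int) := Int.emod_lt_of_pos _ (by exact_mod_cast hn)
    rw [pvCnt, dif_neg (by omega)]
    rw [Int.ediv_eq_zero_of_lt (by omega) (by omega)]
  | succ k ih =>
    have hnZ : ((n : Int)) ≠ 0 := by exact_mod_cast hn.ne'
    have hD0 : (0 : Int) ≤ ((j : Int) - i - 1) % (n : Int) := Int.emod_nonneg _ hnZ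
    have hDn : ((j : Int) - i - 1) % (n : Int) < (n : Int) := Int.emod_lt_of_pos _ (by exact_mod_cast hn)
    rw [show ((k + 1 : Nat) : Int) = (k : Int) + 1 by push_cast; ring]
    rw [pvCnt, dif_pos (by omega)]
    rw [show ((k : Int) + 1 - 1) = (k : Int) by ring]
    rw [ih (i + 1)]
    have hjj : ((j : Int)) % (n : Int) = (j : Int) := Int.emod_eq_of_lt (by omega) (by exact_mod_cast hj)
    have hhit : ((i + 1) % (n : Int) = (j : Int)) ↔ (((j : Int) - i - 1) % (n : Int) = 0) := by
      constructor
      · intro h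
        have : ((j : Int)) % (n : Int) = (i + 1) % (n : Int) := by rw [hjj, h]
        rw [Int.emod_eq_emod_iff_emod_sub_eq_zero] at this
        simpa [show (j : Int) - (i + 1) = (j : Int) - i - 1 by ring] using this
      · intro h
        have : ((j : Int)) % (n : Int) = (i + 1) % (n : Int) := by
          rw [Int.emod_eq_emod_iff_emod_sub_eq_zero]
          simpa [show (j : Int) - (i + 1) = (j : Int) - i - 1 by ring] using h
        rw [hjj] at this; omega
    have hshift : ((j : Int) - (i + 1) - 1) % (n : Int)
        = (((j : Int) - i - 1) % (n : Int) - 1 % (n : Int)) % (n : Int) := by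
      rw [← Int.sub_emod]; ring_nf
    by_cases hd : ((j : Int) - i - 1) % (n : Int) = 0
    · rw [if_pos (hhit.2 hd)]
      have hD' : ((j : Int) - (i + 1) - 1) % (n : Int) = (n : Int) - 1 := by
        have e0 : (j : Int) - (i + 1) - 1 = ((j : Int) - i - 1) - 1 := by ring
        rw [e0, Int.sub_emod, hd]
        by_cases h1 : n = 1
        · subst h1; norm_num
        · have hone : (1 : Int) % (n : Int) = 1 :=
            Int.emod_eq_of_lt (by omega) (by exact_mod_cast (by omega : 1 < n))
          rw [hone]
          have e1 : (0 - 1 : Int) = ((n : Int) - 1) + (n : Int) * (-1) := by ring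
          rw [e1, Int.add_mul_emod_self_left]
          exact Int.emod_eq_of_lt (by omega) (by omega)
      rw [hD', hd]
      have e1 : ((k : Int) - ((n : Int) - 1 + 1) + n) = (k : Int) := by ring
      have e2 : ((k : Int) + 1 - (0 + 1) + n) = (k : Int) + (n : Int) * 1 := by ring
      rw [e1, e2, Int.add_mul_ediv_left _ _ hnZ]
      ring
    · rw [if_neg (fun h => hd (hhit.1 h))]
      have h1lt : 1 < n := by
        by_contra h
        have hn1 : n = 1 := by omega
        apply hd
        subst hn1
        simp
      have hone : (1 : Int) % (n : Int) = 1 :=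
        Int.emod_eq_of_lt (by omega) (by exact_mod_cast h1lt)
      have hD' : ((j : Int) - (i + 1) - 1) % (n : Int) = ((j : Int) - i - 1) % (n : Int) - 1 := by
        have e0 : (j : Int) - (i + 1) - 1 = ((j : Int) - i - 1) - 1 := by ring
        rw [e0, Int.sub_emod, hone]
        exact Int.emod_eq_of_lt (by omega) (by omega)
      rw [hD']
      have e : ((k : Int) + 1 - (((j : Int) - i - 1) % (n : Int) + 1) + n)
          = ((k : Int) - ((((j : Int) - i - 1) % (n : Int) - 1) + 1) + n) := by ring
      rw [e]
      ring

theorem pvFoldB_len (nI i0 : Int) (l : List Int) (bb : List Int) :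
    (l.foldl (fun acc k => PySem.List.pySetD acc (PySem.Int.mod (i0 + k) nI)
      (PySem.List.pyGetD acc (PySem.Int.mod (i0 + k) nI) 0 + 1)) bb).length = bb.length := by
  induction l generalizing bb with
  | nil => rfl
  | cons x xs ih => simp only [List.foldl_cons]; rw [ih, PySem.List.length_pySetD]

theorem pvFoldB_get (i0 : Int) (n : Nat) (hn : 0 < n) (t : Nat) (ht : t ≤ n)
    (bb : List Int) (hb : bb.length = n) (j : Nat) (hj : j < n) :
    ((PySem.List.pyRange 1 ((t : Int) + 1) 1).foldl
      (fun acc k => PySem.List.pySetD acc (PySem.Int.mod (i0 + k) (n : Int))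
        (PySem.List.pyGetD acc (PySem.Int.mod (i0 + k) (n : Int)) 0 + 1)) bb)[j]?
      = some (bb[j]'(by omega) +
          (if ((j : Int) - i0 - 1) % (n : Int) + 1 ≤ (t : Int) then 1 else 0)) := by
  have hnZ : ((n : Int)) ≠ 0 := by exact_mod_cast hn.ne'
  have hnI : (0 : Int) < (n : Int) := by exact_mod_cast hn
  have hD0 : (0 : Int) ≤ ((j : Int) - i0 - 1) % (n : Int) := Int.emod_nonneg _ hnZ
  have hDn : ((j : Int) - i0 - 1) % (n : Int) < (n : Int) := Int.emod_lt_of_pos _ hnI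
  induction t with
  | zero =>
    rw [PySem.List.pyRange_one_eq_nil (by norm_num)]
    rw [if_neg (by push_cast; omega)]
    simp [List.getElem?_eq_getElem (by omega : j < bb.length)]
  | succ t ih =>
    have ht' : t ≤ n := by omega
    rw [show ((t + 1 : Nat) : Int) = ((t : Int) + 1) by push_cast; ring]
    rw [PySem.List.pyRange_one_succ_right (by omega)]
    rw [List.foldl_append]
    set L := (PySem.List.pyRange 1 ((t : Int) + 1) 1).foldl
      (fun acc k => PySem.List.pySetD acc (PySem.Int.mod (i0 + k) (n : Int))
        (PySem.List.pyGetD acc (PySem.Int.mod (i0 + k) (n : Int)) 0 + 1)) bb with hL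
    have hLlen : L.length = n := by rw [hL, pvFoldB_len, hb]
    have hLj : L[j]? = some (bb[j]'(by omega) +
        (if ((j : Int) - i0 - 1) % (n : Int) + 1 ≤ (t : Int) then 1 else 0)) := ih ht'
    have hLget : L[j]'(by omega) = bb[j]'(by omega) +
        (if ((j : Int) - i0 - 1) % (n : Int) + 1 ≤ (t : Int) then 1 else 0) := by
      rw [List.getElem?_eq_getElem (show j < L.length by omega)] at hLj
      exact Option.some.inj hLj
    simp only [List.foldl_cons, List.foldl_nil]
    have hmod : PySem.Int.mod (i0 + ((t : Int) + 1)) (n : Int)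
        = (i0 + ((t : Int) + 1)) % (n : Int) := PySem.Int.mod_eq_emod_of_pos hnI
    have hk0 : (0 : Int) ≤ (i0 + ((t : Int) + 1)) % (n : Int) := Int.emod_nonneg _ hnZ
    have hklt : (i0 + ((t : Int) + 1)) % (n : Int) < (n : Int) := Int.emod_lt_of_pos _ hnI
    rw [hmod, PySem.List.pyGetD_eq_getElem L 0 hk0 (by omega),
      PySem.List.pySetD_of_nonneg L _ hk0]
    rw [List.getElem?_set]
    have hhit : (((i0 + ((t : Int) + 1)) % (n : Int)).toNat = j)
        ↔ (((j : Int) - i0 - 1) % (n : Int) = (t : Int)) := by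
      have hjj : ((j : Int)) % (n : Int) = (j : Int) :=
        Int.emod_eq_of_lt (by omega) (by exact_mod_cast hj)
      have htt : ((t : Int)) % (n : Int) = (t : Int) :=
        Int.emod_eq_of_lt (by omega) (by exact_mod_cast (by omega : t < n))
      constructor
      · intro h
        have h' : (i0 + ((t : Int) + 1)) % (n : Int) = (j : Int) := by omega
        have : ((j : Int)) % (n : Int) = (i0 + ((t : Int) + 1)) % (n : Int) := by rw [hjj, h']
        rw [Int.emod_eq_emod_iff_emod_sub_eq_zero] at this
        have e : (j : Int) - (i0 + ((t : Int) + 1)) = ((j : Int) - i0 - 1) - (t : Int) := by ring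
        rw [e] at this
        have : (((j : Int) - i0 - 1)) % (n : Int) = ((t : Int)) % (n : Int) := by
          rw [Int.emod_eq_emod_iff_emod_sub_eq_zero]; exact this
        rw [htt] at this; exact this
      · intro h
        have : (((j : Int) - i0 - 1)) % (n : Int) = ((t : Int)) % (n : Int) := by rw [htt, h]
        rw [Int.emod_eq_emod_iff_emod_sub_eq_zero] at this
        have e : ((j : Int) - i0 - 1) - (t : Int) = (j : Int) - (i0 + ((t : Int) + 1)) := by ring
        rw [e] at this
        have : ((j : Int)) % (n : Int) = (i0 + ((t : Int) + 1)) % (n : Int) := by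
          rw [Int.emod_eq_emod_iff_emod_sub_eq_zero]; exact this
        rw [hjj] at this; omega
    by_cases hc : ((i0 + ((t : Int) + 1)) % (n : Int)).toNat = j
    · rw [if_pos hc]
      have hD : ((j : Int) - i0 - 1) % (n : Int) = (t : Int) := hhit.1 hc
      have e1 : (if ((j : Int) - i0 - 1) % (n : Int) + 1 ≤ (t : Int) then (1 : Int) else 0) = 0 := by
        rw [if_neg (by omega)]
      have e2 : (if ((j : Int) - i0 - 1) % (n : Int) + 1 ≤ (t : Int) + 1 then (1 : Int) else 0) = 1 := by
        rw [if_pos (by omega)]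
      rw [if_pos (show ((i0 + ((t : Int) + 1)) % (n : Int)).toNat < L.length by omega)]
      simp only [hc, hLget, e1, e2]
      norm_num
    · rw [if_neg hc]
      have hD : ¬ (((j : Int) - i0 - 1) % (n : Int) = (t : Int)) := fun h => hc (hhit.2 h)
      rw [hLj]
      by_cases hle : ((j : Int) - i0 - 1) % (n : Int) + 1 ≤ (t : Int)
      · rw [if_pos hle, if_pos (by omega)]
      · rw [if_neg hle, if_neg (by omega)]

theorem pvDivInd (n : Nat) (hn : 0 < n) (m D : Int) (hD0 : 0 ≤ D) (hDn : D < (n : Int)) :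
    (m - (D + 1) + (n : Int)) / (n : Int)
      = m / (n : Int) + (if D + 1 ≤ m % (n : Int) then 1 else 0) := by
  have hnZ : ((n : Int)) ≠ 0 := by exact_mod_cast hn.ne'
  have h := Int.mul_ediv_add_emod m (n : Int)
  set q := m / (n : Int) with hq
  set r := m % (n : Int) with hr
  have hr0 : 0 ≤ r := Int.emod_nonneg _ hnZ
  have hrn : r < (n : Int) := Int.emod_lt_of_pos _ (by exact_mod_cast hn)
  have e : m - (D + 1) + (n : Int) = (r - (D + 1) + (n : Int)) + (n : Int) * q := by
    linear_combination -h
  rw [e, Int.add_mul_ediv_left _ _ hnZ]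
  split_ifs with hle
  · have e2 : r - (D + 1) + (n : Int) = (r - (D + 1)) + (n : Int) * 1 := by ring
    rw [e2, Int.add_mul_ediv_left _ _ hnZ, Int.ediv_eq_zero_of_lt (by omega) (by omega)]
    ring
  · rw [Int.ediv_eq_zero_of_lt (by omega) (by omega)]
    ring

theorem redist_eq (banks : List Int) : pvRedistA banks = pvRedistB banks := by
  unfold pvRedistA pvRedistB
  cases hmax : PySem.List.max? banks (fun x => x) with
  | none => rfl
  | some m =>
    cases hidx : PySem.List.index? banks m with
    | none => simp only [hidx]
    | some i0 =>
      obtain ⟨hi0, hbi, -⟩ := PySem.List.getElem_of_index?_eq_some hidx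
      have hn : 0 < banks.length := Nat.lt_of_le_of_lt (Nat.zero_le _) hi0
      have hnI : (0 : Int) < (banks.length : Int) := by exact_mod_cast hn
      have hnZ : ((banks.length : Int)) ≠ 0 := hnI.ne'
      simp only [hidx]
      by_cases hm : m > 0
      · obtain ⟨mk, rfl⟩ : ∃ mk : Nat, m = (mk : Int) :=
          ⟨m.toNat, (Int.toNat_of_nonneg hm.le).symm⟩
        rw [if_pos hm]
        simp only [PySem.List.len_eq]
        simp only [pvDivmod _ _ hnI]
        apply List.ext_getElem?
        intro j
        by_cases hj : j < banks.length
        · -- A side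
          rw [PySem.List.pySetD_natCast]
          rw [pvRedistLoopA_get mk (banks.set i0 0) (i0 : Int) j (by simpa using hj)]
          simp only [List.length_set]
          rw [pvCnt_closed banks.length hn mk (i0 : Int) j hj]
          rw [pvDivInd banks.length hn (mk : Int) _
            (Int.emod_nonneg _ hnZ) (Int.emod_lt_of_pos _ hnI)]
          -- B side
          have hr0 : (0 : Int) ≤ (mk : Int) % (banks.length : Int) := Int.emod_nonneg _ hnZ
          have hrn : (mk : Int) % (banks.length : Int) < (banks.length : Int) :=
            Int.emod_lt_of_pos _ hnI
          rw [PySem.List.pySetD_natCast]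
          rw [show (mk : Int) % (banks.length : Int) + 1
              = ((((mk : Int) % (banks.length : Int)).toNat : Int)) + 1 from by
            rw [Int.toNat_of_nonneg hr0]]
          rw [pvFoldB_get (i0 : Int) banks.length hn
            ((mk : Int) % (banks.length : Int)).toNat (by omega)
            ((banks.map (fun x => x + (mk : Int) / (banks.length : Int))).set i0
              ((mk : Int) / (banks.length : Int))) (by simp) j hj]
          rw [Int.toNat_of_nonneg hr0]
          congr 1
          rw [List.getElem_set, List.getElem_set]
          by_cases hij : i0 = j
          · rw [if_pos hij, if_pos hij]
            ring
          · rw [if_neg hij, if_neg hij]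
            rw [List.getElem_map]
            ring
        · -- out of range on both sides: both getElem? are none
          rw [List.getElem?_eq_none, List.getElem?_eq_none]
          · rw [pvFoldB_len, PySem.List.length_pySetD, List.length_map]; omega
          · rw [pvRedistLoopA_len, PySem.List.length_pySetD]; omega
      · rw [pvRedistLoopA, dif_neg hm, if_neg hm]

theorem loop_eq (fuel : Nat) (banks : List Int) (states : List (List Int))
    (seen : PySem.Set (List Int)) (counter : Int)
    (h : ∀ l, l ∈ states ↔ l ∈ seen) :
    pvLoopA fuel banks states counter = pvLoopB fuel banks seen counter := by
  induction fuel generalizing banks states seen counter with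
  | zero => rfl
  | succ f ih =>
    simp only [pvLoopA, pvLoopB, redist_eq]
    by_cases hm : pvRedistB banks ∈ states
    · rw [if_pos hm, if_pos ((h _).1 hm)]
    · rw [if_neg hm, if_neg (fun hc => hm ((h _).2 hc))]
      exact ih _ _ _ _ (fun l => by
        simp only [List.mem_append, List.mem_singleton, PySem.Set.mem_add, h l])

-- ===== VERDICT (by name: the statement is the Claim_ definition above) =====
theorem reallocate_spec : Claim_equal_reallocate := by
  intro banks _ _
  unfold Spec_reallocate reallocate reallocate_alt
  exact loop_eq _ _ _ _ _ (fun l => by simp [PySem.Set.mem_ofList])
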